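-- pv_equiv track=rewrite | github.com/jakubklosin/ChessBestMoveModel | analyze_Board.py | predictions_to_fen
-- ===== SOURCE A (Python) =====
-- CLASS_TO_FEN = {
--     'wp': 'P', 'wn': 'N', 'wb': 'B', 'wr': 'R', 'wq': 'Q', 'wk': 'K',
--     'bp': 'p', 'bn': 'n', 'bb': 'b', 'br': 'r', 'bq': 'q', 'bk': 'k',
--     'empty': '1'
-- }
--
-- def predictions_to_fen(predictions, side='w'):
--     fen_rows = []
--     ranks = range(8, 0, -1) if side == 'w' else range(1, 9)
--     for rank in ranks:
--         row = ""
--         empty_count = 0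
--         for file in "abcdefgh":
--             square = f"{file}{rank}"
--             label = predictions.get(square, 'empty')
--             symbol = CLASS_TO_FEN[label]
--             if symbol == '1':
--                 empty_count += 1
--             else:
--                 if empty_count:
--                     row += str(empty_count)
--                     empty_count = 0
--                 row += symbol
--         if empty_count:
--             row += str(empty_count)
--         fen_rows.append(row)
--     if side == 'b':
--         fen_rows = fen_rows[::-1]
--     return "/".join(fen_rows) + f" {side} - - 0 1"
-- ===== SOURCE B (Python) =====
-- CLASS_TO_FEN = {
--     'wp': 'P', 'wn': 'N', 'wb': 'B', 'wr': 'R', 'wq': 'Q', 'wk': 'K',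
--     'bp': 'p', 'bn': 'n', 'bb': 'b', 'br': 'r', 'bq': 'q', 'bk': 'k',
--     'empty': '1'
-- }
--
--
-- def _compress(raw):
--     """Run-length-compress maximal runs of '1' into their count (other runs kept)."""
--     if not raw:
--         return ""
--     c = raw[0]
--     k = 1
--     while k < len(raw) and raw[k] == c:
--         k += 1
--     head = str(k) if c == '1' else c * k
--     return head + _compress(raw[k:])
--
--
-- def _raw_row(predictions, rank):
--     return "".join(CLASS_TO_FEN[predictions.get(f"{f}{rank}", 'empty')] for f in "abcdefgh")
--
--
-- def predictions_to_fen(predictions, side='w'):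
--     ranks = range(8, 0, -1) if side == 'w' else range(1, 9)
--     rows = [_compress(_raw_row(predictions, rank)) for rank in ranks]
--     if side == 'b':
--         rows = rows[::-1]
--     return "/".join(rows) + f" {side} - - 0 1"
-- ===== Notes on version B (the rewrite author's own statement) =====
-- stated objective: idiomatic
-- what changed: A's inline empty-square counter woven through the per-square loop is replaced by a two-pass decomposition: each rank is first rendered as a raw 8-symbol string (empty -> '1') and then a separate recursive run-length pass compresses maximal runs of '1' into their count.
import Mathlib
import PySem

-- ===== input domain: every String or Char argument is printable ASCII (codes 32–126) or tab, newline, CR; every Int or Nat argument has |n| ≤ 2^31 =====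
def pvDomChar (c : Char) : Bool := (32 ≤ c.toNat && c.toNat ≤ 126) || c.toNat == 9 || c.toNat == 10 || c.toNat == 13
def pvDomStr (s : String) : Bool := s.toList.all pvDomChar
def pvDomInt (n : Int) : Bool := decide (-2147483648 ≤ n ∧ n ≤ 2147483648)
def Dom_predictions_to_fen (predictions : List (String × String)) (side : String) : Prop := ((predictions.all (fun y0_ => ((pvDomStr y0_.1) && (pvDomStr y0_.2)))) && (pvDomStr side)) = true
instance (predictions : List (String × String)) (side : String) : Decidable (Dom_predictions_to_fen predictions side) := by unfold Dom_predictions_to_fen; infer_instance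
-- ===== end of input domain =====

-- B replaces A's inline empty-square counter by a two-pass per-rank decomposition
-- (render a raw 8-symbol row with '1' markers, then run-length-compress the '1' runs);
-- same cost, chosen for idiomatic clarity, return value proved identical on Pre_.

-- ===== PORT A =====
def classToFen : PySem.Dict String String := PySem.Dict.ofList
  [("wp", "P"), ("wn", "N"), ("wb", "B"), ("wr", "R"), ("wq", "Q"), ("wk", "K"),
   ("bp", "p"), ("bn", "n"), ("bb", "b"), ("br", "r"), ("bq", "q"), ("bk", "k"),
   ("empty", "1")]

-- CLASS_TO_FEN[label]: Python raises KeyError on an unknown label; Pre_ excludes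
-- exactly those inputs, so the "?" default is never reached inside Pre_.
def pvSymA (pd : PySem.Dict String String) (rank : Int) (file : Char) : List Char :=
  (classToFen.getD (pd.getD (String.mk (file :: PySem.Int.toChars rank)) "empty") "?").toList

def pvFlush (r : List Char) (n : Int) : List Char :=
  if n ≠ 0 then r ++ PySem.Int.toChars n else r

def pvStepA (pd : PySem.Dict String String) (rank : Int) (acc : List Char × Int) (file : Char) :
    List Char × Int :=
  let symbol := pvSymA pd rank file
  if symbol = ['1'] then (acc.1, acc.2 + 1)
  else (pvFlush acc.1 acc.2 ++ symbol, 0)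

def predictions_to_fen (predictions : List (String × String)) (side : String) : String :=
  let pd := PySem.Dict.ofList predictions
  let ranks := if side = "w" then PySem.List.pyRange 8 0 (-1) else PySem.List.pyRange 1 9 1
  let fen_rows := ranks.foldl (fun rows rank =>
      let st := "abcdefgh".toList.foldl (pvStepA pd rank) ([], 0)
      rows ++ [pvFlush st.1 st.2]) ([] : List (List Char))
  let fen_rows := if side = "b" then fen_rows.reverse else fen_rows
  String.mk (PySem.Chars.join ['/'] fen_rows ++ (' ' :: side.toList ++ " - - 0 1".toList))

-- ===== PORT B =====
def pvSymB (pd : PySem.Dict String String) (rank : Int) (file : Char) : List Char :=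
  (classToFen.getD (pd.getD (String.mk (file :: PySem.Int.toChars rank)) "empty") "?").toList

def pvRunLen (c : Char) : List Char → Nat
  | [] => 0
  | d :: tl => if d = c then pvRunLen c tl + 1 else 0

-- _compress: leading run of length k = pvRunLen c tl + 1, emit str(k) for '1'-runs, c*k otherwise
def pvCompress : List Char → List Char
  | [] => []
  | c :: tl =>
    let k := pvRunLen c tl + 1
    (if c = '1' then PySem.Int.toChars (k : Int) else List.replicate k c) ++
      pvCompress (List.drop (k - 1) tl)
termination_by cs => cs.length
decreasing_by
  simp only [List.length_cons, List.length_drop]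
  omega

def pvRawRow (pd : PySem.Dict String String) (rank : Int) : List Char :=
  "abcdefgh".toList.flatMap (pvSymB pd rank)

def predictions_to_fen_alt (predictions : List (String × String)) (side : String) : String :=
  let pd := PySem.Dict.ofList predictions
  let ranks := if side = "w" then PySem.List.pyRange 8 0 (-1) else PySem.List.pyRange 1 9 1
  let rows := ranks.map (fun rank => pvCompress (pvRawRow pd rank))
  let rows := if side = "b" then rows.reverse else rows
  String.mk (PySem.Chars.join ['/'] rows ++ (' ' :: side.toList ++ " - - 0 1".toList))

-- ===== PRECONDITION & SPEC =====
def pvSquares : List String :=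
  "abcdefgh".toList.flatMap (fun f => (PySem.List.pyRange 1 9 1).map
    (fun r => String.mk (f :: PySem.Int.toChars r)))

def pvValidLabels : List String :=
  ["wp", "wn", "wb", "wr", "wq", "wk", "bp", "bn", "bb", "br", "bq", "bk", "empty"]

-- Pre_ excludes exactly the inputs where Python A raises KeyError: some board square's
-- effective label (dict value, default 'empty') is not a key of CLASS_TO_FEN.
def Pre_predictions_to_fen (predictions : List (String × String)) (side : String) : Prop :=
  ∀ s ∈ pvSquares, (PySem.Dict.ofList predictions).getD s "empty" ∈ pvValidLabels

instance (predictions : List (String × String)) (side : String) :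
    Decidable (Pre_predictions_to_fen predictions side) := by
  unfold Pre_predictions_to_fen; infer_instance

def pvWitness_predictions_to_fen : (List (String × String)) × String :=
  ([("e1", "wk"), ("e8", "bk"), ("d4", "wp")], "w")

def Spec_predictions_to_fen (predictions : List (String × String)) (side : String) (out : String) : Prop := out = predictions_to_fen_alt predictions side
instance (predictions : List (String × String)) (side : String) (out : String) : Decidable (Spec_predictions_to_fen predictions side out) := by unfold Spec_predictions_to_fen; infer_instance

-- ===== CLAIM (what is proved, stated in full; the proofs are below) =====
def Claim_equal_predictions_to_fen : Prop := ∀ (predictions : List (String × String)) (side : String), Dom_predictions_to_fen predictions side → Pre_predictions_to_fen predictions side → Spec_predictions_to_fen predictions side (predictions_to_fen predictions side)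

-- ===== LEMMAS AND PROOFS =====

-- every CLASS_TO_FEN value (and the never-reached default "?") is a single character
theorem pvSym_single (pd : PySem.Dict String String) (rank : Int) (file : Char) :
    ∃ c : Char, pvSymA pd rank file = [c] := by
  unfold pvSymA
  generalize pd.getD (String.mk (file :: PySem.Int.toChars rank)) "empty" = l
  rw [PySem.Dict.getD_eq_get?_getD]
  cases h : classToFen.get? l with
  | none => exact ⟨'?', rfl⟩
  | some v =>
    have hm := PySem.Dict.mem_items_of_get?_eq_some classToFen h
    have hitems : classToFen.items =
        [("wp", "P"), ("wn", "N"), ("wb", "B"), ("wr", "R"), ("wq", "Q"), ("wk", "K"),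
         ("bp", "p"), ("bn", "n"), ("bb", "b"), ("br", "r"), ("bq", "q"), ("bk", "k"),
         ("empty", "1")] := by decide
    rw [hitems] at hm
    simp only [List.mem_cons, List.not_mem_nil, or_false, Prod.mk.injEq] at hm
    rcases hm with ⟨-, rfl⟩ | ⟨-, rfl⟩ | ⟨-, rfl⟩ | ⟨-, rfl⟩ | ⟨-, rfl⟩ | ⟨-, rfl⟩ |
      ⟨-, rfl⟩ | ⟨-, rfl⟩ | ⟨-, rfl⟩ | ⟨-, rfl⟩ | ⟨-, rfl⟩ | ⟨-, rfl⟩ | ⟨-, rfl⟩ <;>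
      exact ⟨_, rfl⟩

def pvCharStep (acc : List Char × Int) (c : Char) : List Char × Int :=
  if c = '1' then (acc.1, acc.2 + 1) else (pvFlush acc.1 acc.2 ++ [c], 0)

theorem pvRunLen_replicate (c : Char) (m : Nat) : pvRunLen c (List.replicate m c) = m := by
  induction m with
  | zero => rfl
  | succ m ih => simp [List.replicate_succ, pvRunLen, ih]

theorem pvRunLen_replicate_append (c d : Char) (m : Nat) (l : List Char) (h : d ≠ c) :
    pvRunLen c (List.replicate m c ++ d :: l) = m := by
  induction m with
  | zero => simp [pvRunLen, h]
  | succ m ih => simp [List.replicate_succ, pvRunLen, ih]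

theorem pvCompress_ones (n : Nat) (hn : 0 < n) :
    pvCompress (List.replicate n '1') = PySem.Int.toChars (n : Int) := by
  obtain ⟨m, rfl⟩ := Nat.exists_eq_succ_of_ne_zero hn.ne'
  rw [List.replicate_succ, pvCompress]
  simp [pvRunLen_replicate, List.drop_replicate, pvCompress]

theorem pvCompress_ones_cons (n : Nat) (c : Char) (hc : c ≠ '1') (l : List Char) :
    pvCompress (List.replicate n '1' ++ c :: l) =
      (if n ≠ 0 then PySem.Int.toChars (n : Int) else []) ++ pvCompress (c :: l) := by
  rcases Nat.eq_zero_or_pos n with rfl | hn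
  · simp
  · obtain ⟨m, rfl⟩ := Nat.exists_eq_succ_of_ne_zero hn.ne'
    rw [List.replicate_succ, List.cons_append, pvCompress]
    rw [pvRunLen_replicate_append '1' c m _ hc]
    have hd : List.drop (m + 1 - 1) (List.replicate m '1' ++ c :: l) = c :: l := by
      simp
    simp [hd]

theorem pvCompress_cons_ne (c : Char) (hc : c ≠ '1') (l : List Char) :
    pvCompress (c :: l) = c :: pvCompress l := by
  cases l with
  | nil => simp [pvCompress, pvRunLen, hc]
  | cons d tl =>
    by_cases hdc : d = c
    · subst hdc
      rw [pvCompress, pvCompress]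
      simp only [pvRunLen]
      simp [hc, List.replicate_succ]
    · rw [pvCompress]
      simp [pvRunLen, hdc, hc]

-- A's inline counter loop over the row characters equals B's compress of the raw row
theorem pvFold_eq_compress (cs : List Char) (r : List Char) (n : Nat) :
    pvFlush (cs.foldl pvCharStep (r, (n : Int))).1 (cs.foldl pvCharStep (r, (n : Int))).2 =
      r ++ pvCompress (List.replicate n '1' ++ cs) := by
  induction cs generalizing r n with
  | nil =>
    simp only [List.foldl_nil, List.append_nil, pvFlush]
    rcases Nat.eq_zero_or_pos n with rfl | hn
    · simp [pvCompress]
    · rw [pvCompress_ones n hn]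
      simp [hn.ne']
  | cons c tl ih =>
    by_cases hc : c = '1'
    · subst hc
      rw [List.foldl_cons]
      have hstep : pvCharStep (r, (n : Int)) '1' = (r, ((n + 1 : Nat) : Int)) := by
        simp [pvCharStep]
      rw [hstep, ih]
      congr 1
      rw [show List.replicate n '1' ++ '1' :: tl = List.replicate (n + 1) '1' ++ tl by
        simp [List.replicate_succ', List.append_assoc]]
    · rw [List.foldl_cons]
      have hstep : pvCharStep (r, (n : Int)) c = (pvFlush r (n : Int) ++ [c], ((0 : Nat) : Int)) := by
        simp [pvCharStep, hc]
      rw [hstep, ih]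
      rw [pvCompress_ones_cons n c hc tl, pvCompress_cons_ne c hc tl]
      simp only [pvFlush]
      rcases Nat.eq_zero_or_pos n with rfl | hn
      · simp
      · simp [hn.ne', List.append_assoc]

-- A's per-square step is the character step on the (single-character) symbol
theorem pvStepA_eq_charStep (pd : PySem.Dict String String) (rank : Int)
    (acc : List Char × Int) (file : Char) :
    pvStepA pd rank acc file = pvCharStep acc ((pvSymA pd rank file).headD '?') := by
  obtain ⟨c, hc⟩ := pvSym_single pd rank file
  simp [pvStepA, pvCharStep, hc]

theorem pvFlatMap_singles (pd : PySem.Dict String String) (rank : Int) (fs : List Char) :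
    fs.flatMap (pvSymB pd rank) = fs.map (fun f => (pvSymA pd rank f).headD '?') := by
  induction fs with
  | nil => rfl
  | cons f fs ih =>
    obtain ⟨c, hc⟩ := pvSym_single pd rank f
    have hb : pvSymB pd rank f = pvSymA pd rank f := rfl
    simp [List.flatMap_cons, ih, hb, hc]

theorem pvRow_eq (pd : PySem.Dict String String) (rank : Int) :
    pvFlush ("abcdefgh".toList.foldl (pvStepA pd rank) ([], 0)).1
        ("abcdefgh".toList.foldl (pvStepA pd rank) ([], 0)).2 =
      pvCompress (pvRawRow pd rank) := by
  have hstep : "abcdefgh".toList.foldl (pvStepA pd rank) ([], 0) =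
      ("abcdefgh".toList.map (fun f => (pvSymA pd rank f).headD '?')).foldl pvCharStep ([], 0) := by
    rw [List.foldl_map]
    exact PySem.List.foldl_congr_mem _ _ _ _ (fun acc f _ => pvStepA_eq_charStep pd rank acc f)
  have hraw : pvRawRow pd rank =
      "abcdefgh".toList.map (fun f => (pvSymA pd rank f).headD '?') :=
    pvFlatMap_singles pd rank _
  rw [hstep, hraw]
  have := pvFold_eq_compress ("abcdefgh".toList.map (fun f => (pvSymA pd rank f).headD '?')) [] 0
  simpa using this

-- ===== VERDICT (by name: the statement is the Claim_ definition above) =====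
theorem predictions_to_fen_spec : Claim_equal_predictions_to_fen := by
  intro predictions side _ _
  show predictions_to_fen predictions side = predictions_to_fen_alt predictions side
  unfold predictions_to_fen predictions_to_fen_alt
  have hrows : ∀ ranks : List Int,
      ranks.foldl (fun rows rank =>
        let st := "abcdefgh".toList.foldl (pvStepA (PySem.Dict.ofList predictions) rank) ([], 0)
        rows ++ [pvFlush st.1 st.2]) ([] : List (List Char)) =
      ranks.map (fun rank => pvCompress (pvRawRow (PySem.Dict.ofList predictions) rank)) := by
    intro ranks
    rw [PySem.List.foldl_append_singleton_eq_map]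
    exact List.map_congr_left (fun rank _ => pvRow_eq (PySem.Dict.ofList predictions) rank)
  simp only [hrows]
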